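-- pv_equiv track=rewrite | github.com/claireguyatt/Data-Science | hw5/submission_template/src/clean.py | tags_check
-- ===== SOURCE A (Python) =====
-- def tags_check(post):
--
--     # don't do checks if post already invalid
--     if (post == None):
--         return None
--
--     # do checks only if tag field is present
--     tags = "tags"
--     if (tags in post):
--         for tag in post[tags]:
--             # split tag into indv words
--             indv_words = tag.split()
--             # add all indv words to tags
--             post[tags] = post[tags] + indv_words
--             # remove the unsplit tags
--             post[tags].remove(tag)
--
--     return post
-- ===== SOURCE B (Python) =====
-- def tags_check(post):
--     # Same final value (and same in-place mutation of post["tags"]) as A,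
--     # computed directly as one flattening pass.
--     if post is None:
--         return None
--     if "tags" in post:
--         post["tags"] = [word for tag in post["tags"] for word in tag.split()]
--     return post
-- ===== Notes on version B (the rewrite author's own statement) =====
-- stated objective: simpler
-- what changed: A repeatedly rebuilds the tags list (concatenate the split words, then remove the unsplit tag, once per tag, each concat copying the whole list); B builds the flattened word list in a single comprehension pass and assigns it once.
import Mathlib
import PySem

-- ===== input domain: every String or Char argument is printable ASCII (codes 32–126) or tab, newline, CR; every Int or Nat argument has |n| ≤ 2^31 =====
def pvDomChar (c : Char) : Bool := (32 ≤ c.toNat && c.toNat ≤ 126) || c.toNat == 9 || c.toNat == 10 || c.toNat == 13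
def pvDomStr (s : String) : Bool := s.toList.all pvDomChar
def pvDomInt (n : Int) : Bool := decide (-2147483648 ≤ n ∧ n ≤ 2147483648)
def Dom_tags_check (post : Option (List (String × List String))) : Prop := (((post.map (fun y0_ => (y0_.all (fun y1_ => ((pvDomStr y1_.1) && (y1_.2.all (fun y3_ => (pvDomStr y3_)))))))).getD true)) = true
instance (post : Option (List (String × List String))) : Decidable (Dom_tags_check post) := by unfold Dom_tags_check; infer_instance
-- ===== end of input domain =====

-- B flattens post["tags"] in one comprehension pass instead of A's per-tag concat-and-remove
-- rebuilding; same return value (both also mutate post["tags"] in place to the same final list).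

-- ===== PORT A =====
-- A's loop body: post[tags] = post[tags] + tag.split(); post[tags].remove(tag).
-- The .remove mutation is ported as Dict.modify with List.remove?; the .getD fallback is
-- unreachable (tag is always present — proved below), matching Python, which never raises here.
def tags_check (post : Option (List (String × List String))) : Option (List (String × List String)) :=
  match post with
  | none => none
  | some items =>
    let d := PySem.Dict.ofList items
    let d' :=
      if d.contains "tags" then
        (d.getD "tags" []).foldl
          (fun dd tag =>
            let dd1 := dd.insert "tags" (dd.getD "tags" [] ++ PySem.Str.split₀ tag)
            dd1.modify "tags" [] (fun l => (PySem.List.remove? l tag).getD l))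
          d
      else d
    some d'.items

-- ===== PORT B =====
def tags_check_alt (post : Option (List (String × List String))) : Option (List (String × List String)) :=
  match post with
  | none => none
  | some items =>
    let d := PySem.Dict.ofList items
    match d.get? "tags" with
    | none => some d.items
    | some ts => some ((d.insert "tags" (ts.flatMap (fun tag => PySem.Str.split₀ tag))).items)

-- ===== PRECONDITION & SPEC =====
def Spec_tags_check (post : Option (List (String × List String))) (out : Option (List (String × List String))) : Prop := out = tags_check_alt post
instance (post : Option (List (String × List String))) (out : Option (List (String × List String))) : Decidable (Spec_tags_check post out) := by unfold Spec_tags_check; infer_instance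

-- ===== CLAIM (what is proved, stated in full; the proofs are below) =====
def Claim_equal_tags_check : Prop := ∀ (post : Option (List (String × List String))), Dom_tags_check post → Spec_tags_check post (tags_check post)

-- ===== LEMMAS AND PROOFS =====

-- re-inserting a key's current value does not change the dict (keys unique)
theorem insert_current_self {κ ν : Type} [BEq κ] [LawfulBEq κ] (d : PySem.Dict κ ν) (k : κ) (v : ν)
    (hnd : d.keys.Nodup) (h : d.get? k = some v) : d.insert k v = d := by
  apply PySem.Dict.ext
  rw [PySem.Dict.items_insert_of_contains _ _ (by
    rw [PySem.Dict.contains_eq_isSome_get?, h]; rfl)]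
  apply List.map_congr_left ?_ |>.trans (List.map_id _)
  intro p hp
  by_cases hk : p.1 == k
  · have hk' : p.1 = k := by simpa using hk
    have : d.get? p.1 = some p.2 := PySem.Dict.get?_of_mem_items d (by simpa using hp) hnd
    rw [hk', h] at this
    have hv : v = p.2 := Option.some.inj this
    rw [if_pos hk, hv, ← hk']
    simp
  · simp [hk]

-- Dict.modify with the key present is Dict.insert of the modified value (definitional)
theorem modify_eq_insert (d : PySem.Dict String (List String)) (k : String)
    (f : List String → List String) :
    d.modify k [] f = d.insert k (f (d.getD k [])) := rfl

-- A's loop invariant: the current "tags" value is the unprocessed tags followed by the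
-- words accumulated so far; each step removes the head tag and appends its split words.
theorem loopA_eq : ∀ (ts flat : List String) (d : PySem.Dict String (List String)),
    d.keys.Nodup → d.get? "tags" = some (ts ++ flat) →
    ts.foldl
      (fun dd tag =>
        let dd1 := dd.insert "tags" (dd.getD "tags" [] ++ PySem.Str.split₀ tag)
        dd1.modify "tags" [] (fun l => (PySem.List.remove? l tag).getD l)) d
    = d.insert "tags" (flat ++ ts.flatMap (fun tag => PySem.Str.split₀ tag)) := by
  intro ts
  induction ts with
  | nil =>
    intro flat d hnd h
    simpa using (insert_current_self d "tags" flat hnd (by simpa using h)).symm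
  | cons t rest ih =>
    intro flat d hnd h
    have hget : d.getD "tags" [] = t :: (rest ++ flat) := by
      rw [PySem.Dict.getD_eq_get?_getD, h]; rfl
    simp only [List.foldl_cons]
    rw [modify_eq_insert]
    rw [PySem.Dict.getD_insert_self, hget]
    have hrem : (PySem.List.remove? ((t :: (rest ++ flat)) ++ PySem.Str.split₀ t) t).getD
        ((t :: (rest ++ flat)) ++ PySem.Str.split₀ t) = rest ++ flat ++ PySem.Str.split₀ t := by
      simp [List.cons_append, PySem.List.remove?_cons_self]
    rw [PySem.Dict.insert_insert_self, hrem]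
    rw [ih (flat ++ PySem.Str.split₀ t) _
      (by exact PySem.Dict.nodup_keys_insert _ _ _ hnd)
      (by rw [PySem.Dict.get?_insert_self]; simp)]
    rw [PySem.Dict.insert_insert_self]
    simp

-- ===== VERDICT (by name: the statement is the Claim_ definition above) =====
theorem tags_check_spec : Claim_equal_tags_check := by
  unfold Claim_equal_tags_check
  intro post _
  unfold Spec_tags_check tags_check tags_check_alt
  match post with
  | none => rfl
  | some items =>
    simp only
    set d := PySem.Dict.ofList items with hd
    have hnd : d.keys.Nodup := PySem.Dict.nodup_keys_ofList items
    cases hg : d.get? "tags" with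
    | none =>
      have hc : d.contains "tags" = false := by
        rw [PySem.Dict.contains_eq_isSome_get?, hg]; rfl
      simp [hc]
    | some ts =>
      have hc : d.contains "tags" = true := by
        rw [PySem.Dict.contains_eq_isSome_get?, hg]; rfl
      have hgd : d.getD "tags" [] = ts := by
        rw [PySem.Dict.getD_eq_get?_getD, hg]; rfl
      simp only [hc, if_true, hgd]
      rw [loopA_eq ts [] d hnd (by simpa using hg)]
      simp
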